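-- pv_equiv track=rewrite | github.com/adam147g/introduction-to-computer-science | Exercises/set 6/zestaw-6-zadanie-27.py | non_overlapping_squares
-- ===== SOURCE A (Python) =====
-- def square_collision(check_list):
--     for i in range(len(check_list) - 1):
--         s1_x1, s1_x2, s1_y1, s1_y2 = check_list[i]
--         s2_x1, s2_x2, s2_y1, s2_y2 = check_list[len(check_list) - 1]
--         if not (s1_x1 > s2_x2 or s1_x2 < s2_x1 or s1_y1 > s2_y2 or s1_y2 < s2_y1 or
--                 (s1_x2 > s2_x2 and s1_x1 < s2_x1 and s1_y1 < s2_y1 and s1_y2 > s2_y2)):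
--             return True
--     return False
--
-- def new_arguments(T, i):
--     new_x1 = T[i][0]
--     new_x2 = T[i][1]
--     new_y1 = T[i][2]
--     new_y2 = T[i][3]
--     return new_x1, new_x2, new_y1, new_y2
--
-- def summary_square(arguments):
--     return abs(arguments[1] - arguments[0]) * abs(arguments[3] - arguments[2])
--
-- def non_overlapping_squares(T, area=0, idx=0, squares=[]):
--     if square_collision(squares) or area > 2012:
--         return False
--     if len(squares) == 13:
--         if area == 2012:
--             return True
--         return False
--     for i in range(idx, len(T)):
--         arguments = new_arguments(T, i)
--         if non_overlapping_squares(T, area + summary_square(arguments), i, squares + [arguments]):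
--             return True
--     return False
-- ===== SOURCE B (Python) =====
-- def non_overlapping_squares(T, area=0, idx=0, squares=[]):
--     # Explicit-stack worklist DFS instead of recursion; same guards applied at pop time.
--     stack = [(area, idx, list(squares))]
--     while stack:
--         area, idx, squares = stack.pop()
--         if squares:
--             lx1, lx2, ly1, ly2 = squares[-1]
--             if any(not (x1 > lx2 or x2 < lx1 or y1 > ly2 or y2 < ly1 or
--                         (x2 > lx2 and x1 < lx1 and y1 < ly1 and y2 > ly2))
--                    for (x1, x2, y1, y2) in squares[:-1]):
--                 continue
--         if area > 2012:
--             continue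
--         if len(squares) == 13:
--             if area == 2012:
--                 return True
--             continue
--         for i in reversed(range(idx, len(T))):
--             x1, x2, y1, y2 = T[i]
--             stack.append((area + abs(x2 - x1) * abs(y2 - y1), i,
--                           squares + [(x1, x2, y1, y2)]))
--     return False
-- ===== Notes on version B (the rewrite author's own statement) =====
-- stated objective: alternative
-- what changed: The recursive backtracking search is replaced by an iterative explicit-stack worklist DFS: states (area, idx, squares) are pushed/popped and the same guards are applied at pop time, so no Python recursion is used.
import Mathlib
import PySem

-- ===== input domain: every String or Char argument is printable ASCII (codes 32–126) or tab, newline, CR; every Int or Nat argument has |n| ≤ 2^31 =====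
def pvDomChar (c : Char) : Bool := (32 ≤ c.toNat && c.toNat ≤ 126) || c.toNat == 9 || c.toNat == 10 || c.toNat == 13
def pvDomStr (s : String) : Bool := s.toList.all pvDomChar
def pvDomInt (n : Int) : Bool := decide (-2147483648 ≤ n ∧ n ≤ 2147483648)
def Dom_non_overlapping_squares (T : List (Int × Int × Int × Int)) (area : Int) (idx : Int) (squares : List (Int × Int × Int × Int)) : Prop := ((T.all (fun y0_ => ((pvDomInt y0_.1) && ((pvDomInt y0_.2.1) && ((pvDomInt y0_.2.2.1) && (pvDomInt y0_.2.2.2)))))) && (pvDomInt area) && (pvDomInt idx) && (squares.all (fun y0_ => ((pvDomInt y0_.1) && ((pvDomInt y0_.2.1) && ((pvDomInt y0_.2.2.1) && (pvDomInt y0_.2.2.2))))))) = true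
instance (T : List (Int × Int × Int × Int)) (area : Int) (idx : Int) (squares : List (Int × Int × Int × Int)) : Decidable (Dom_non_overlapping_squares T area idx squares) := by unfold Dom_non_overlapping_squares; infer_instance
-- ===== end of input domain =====

-- B replaces A's recursive backtracking by an explicit-stack worklist DFS (same guards, applied
-- at pop time); objective: alternative decomposition, same exponential search, equal return value.
-- Both ports carry a fuel bound (a totality device only; large enough for every terminating run).

-- ===== PORT A =====
-- helper square_collision: last square of check_list against every earlier one
def pvNoOverlap (s1 s2 : Int × Int × Int × Int) : Bool :=
  decide (s1.1 > s2.2.1 ∨ s1.2.1 < s2.1 ∨ s1.2.2.1 > s2.2.2.2 ∨ s1.2.2.2 < s2.2.2.1 ∨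
    (s1.2.1 > s2.2.1 ∧ s1.1 < s2.1 ∧ s1.2.2.1 < s2.2.2.1 ∧ s1.2.2.2 > s2.2.2.2))

def pvSquareCollision (checkList : List (Int × Int × Int × Int)) : Bool :=
  (List.range (checkList.length - 1)).any fun i =>
    ! pvNoOverlap (checkList.getD i (0, 0, 0, 0)) (checkList.getD (checkList.length - 1) (0, 0, 0, 0))

-- helper new_arguments: T[i] (none = IndexError, excluded by Pre_)
def pvNewArguments (T : List (Int × Int × Int × Int)) (i : Int) : Option (Int × Int × Int × Int) :=
  PySem.List.pyGet? T i

-- helper summary_square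
def pvSummarySquare (a : Int × Int × Int × Int) : Int :=
  |a.2.1 - a.1| * |a.2.2.2 - a.2.2.1|

-- fuel: an upper bound on A's recursion depth on every input where A terminates
def pvFuel (T : List (Int × Int × Int × Int)) : Nat := 4026 * T.length + 4030

def pvGoA (T : List (Int × Int × Int × Int)) :
    Nat → Int → Int → List (Int × Int × Int × Int) → Bool
  | fuel, area, idx, squares =>
    if pvSquareCollision squares || decide (area > 2012) then false
    else if squares.length = 13 then decide (area = 2012)
    else
      match fuel with
      | 0 => false
      | f + 1 =>
        (PySem.List.pyRange idx (T.length : Int) 1).any fun i =>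
          match pvNewArguments T i with
          | none => false
          | some arg => pvGoA T f (area + pvSummarySquare arg) i (squares ++ [arg])

def non_overlapping_squares (T : List (Int × Int × Int × Int)) (area : Int) (idx : Int) (squares : List (Int × Int × Int × Int)) : Bool :=
  pvGoA T (pvFuel T) area idx squares

-- ===== PORT B =====
-- inline collision test of Source B: squares[-1] against squares[:-1]
def pvCollideLast (squares : List (Int × Int × Int × Int)) : Bool :=
  match squares.getLast? with
  | none => false
  | some last =>
    (PySem.List.slice squares none (some (-1))).any fun s =>
      ! decide (s.1 > last.2.1 ∨ s.2.1 < last.1 ∨ s.2.2.1 > last.2.2.2 ∨ s.2.2.2 < last.2.2.1 ∨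
          (s.2.1 > last.2.1 ∧ s.1 < last.1 ∧ s.2.2.1 < last.2.2.1 ∧ s.2.2.2 > last.2.2.2))

-- children pushed by one pop: Source B pushes for i in reversed(range(idx, len(T))) and pops LIFO,
-- so the resulting stack (head = top) starts with the children in ascending i
def pvStep (T : List (Int × Int × Int × Int)) (f : Nat) (area : Int) (idx : Int)
    (squares : List (Int × Int × Int × Int)) : List (Nat × Int × Int × List (Int × Int × Int × Int)) :=
  (PySem.List.pyRange idx (T.length : Int) 1).filterMap fun i =>
    (PySem.List.pyGet? T i).map fun sq =>
      (f, area + |sq.2.1 - sq.1| * |sq.2.2.2 - sq.2.2.1|, i, squares ++ [sq])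

def pvWeight (T : List (Int × Int × Int × Int)) (s : Nat × Int × Int × List (Int × Int × Int × Int)) : Nat :=
  ((T.length - s.2.2.1).toNat + 1) ^ s.1

-- termination lemma for the worklist loop: one pop spends more weight than its children carry
theorem pvStep_weight (T : List (Int × Int × Int × Int)) (f : Nat) (area idx : Int)
    (squares : List (Int × Int × Int × Int)) :
    ((pvStep T f area idx squares).map (pvWeight T)).sum < ((T.length - idx).toNat + 1) ^ (f + 1) := by
  have hbound : ∀ w ∈ (pvStep T f area idx squares).map (pvWeight T),
      w ≤ ((T.length - idx).toNat + 1) ^ f := by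
    intro w hw
    rcases List.mem_map.1 hw with ⟨s, hs, rfl⟩
    rcases List.mem_filterMap.1 hs with ⟨i, hi, hsome⟩
    rcases Option.map_eq_some_iff.1 hsome with ⟨sq, _, rfl⟩
    have hmem := (PySem.List.mem_pyRange_one).1 hi
    have : ((T.length : Int) - i).toNat + 1 ≤ ((T.length : Int) - idx).toNat + 1 := by omega
    exact Nat.pow_le_pow_left this f
  have hlen : ((pvStep T f area idx squares).map (pvWeight T)).length ≤ ((T.length : Int) - idx).toNat := by
    rw [List.length_map]
    calc (pvStep T f area idx squares).length
        ≤ (PySem.List.pyRange idx (T.length : Int) 1).length := List.length_filterMap_le _ _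
      _ = ((T.length : Int) - idx).toNat := PySem.List.length_pyRange_one _ _
  have hsum := List.sum_le_card_nsmul _ _ hbound
  have h1 : (1 : Nat) ≤ (((T.length : Int) - idx).toNat + 1) ^ f := Nat.one_le_pow _ _ (Nat.succ_pos _)
  calc ((pvStep T f area idx squares).map (pvWeight T)).sum
      ≤ ((pvStep T f area idx squares).map (pvWeight T)).length * (((T.length : Int) - idx).toNat + 1) ^ f := by
        simpa [smul_eq_mul] using hsum
    _ ≤ (((T.length : Int) - idx).toNat) * (((T.length : Int) - idx).toNat + 1) ^ f :=
        Nat.mul_le_mul_right _ hlen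
    _ < (((T.length : Int) - idx).toNat + 1) ^ (f + 1) := by
        rw [pow_succ]
        calc (((T.length : Int) - idx).toNat) * (((T.length : Int) - idx).toNat + 1) ^ f
            < (((T.length : Int) - idx).toNat + 1) * (((T.length : Int) - idx).toNat + 1) ^ f := by
              have := Nat.lt_succ_self (((T.length : Int) - idx).toNat)
              exact Nat.mul_lt_mul_of_lt_of_le this (le_refl _) (by positivity)
          _ = (((T.length : Int) - idx).toNat + 1) ^ (f + 1) := by ring
        
theorem pvWeight_pos (T : List (Int × Int × Int × Int)) (s : Nat × Int × Int × List (Int × Int × Int × Int)) :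
    1 ≤ pvWeight T s := Nat.one_le_pow _ _ (Nat.succ_pos _)

def pvGoB (T : List (Int × Int × Int × Int)) :
    List (Nat × Int × Int × List (Int × Int × Int × Int)) → Bool
  | [] => false
  | (fuel, area, idx, squares) :: rest =>
    if pvCollideLast squares then pvGoB T rest
    else if decide (area > 2012) then pvGoB T rest
    else if squares.length = 13 then
      if area = 2012 then true else pvGoB T rest
    else
      match fuel with
      | 0 => pvGoB T rest
      | f + 1 => pvGoB T (pvStep T f area idx squares ++ rest)
termination_by stack => (stack.map (pvWeight T)).sum
decreasing_by
  all_goals simp only [List.map_cons, List.sum_cons, List.map_append, List.sum_append, Nat.succ_eq_add_one]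
  all_goals first
    | exact Nat.lt_add_of_pos_left (pvWeight_pos _ _)
    | exact Nat.add_lt_add_right (pvStep_weight _ _ _ _ _) _

def non_overlapping_squares_alt (T : List (Int × Int × Int × Int)) (area : Int) (idx : Int) (squares : List (Int × Int × Int × Int)) : Bool :=
  pvGoB T [(pvFuel T, area, idx, squares)]

-- ===== PRECONDITION & SPEC =====
-- Pre_ excludes (a) idx < -len(T), where the recursion's first index access T[idx] raises
-- IndexError unless a top-level guard fires first, and (b) pre-filled `squares` longer than 13
-- combined with a zero-area square of T that fails A's self-overlap test ((x1=x2 ∧ y1>y2) or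
-- (y1=y2 ∧ x1>x2)), on which A can revisit the same index forever without growing the area and
-- diverges (RecursionError); a few such inputs are pruned early and still return (see cites).
def Pre_non_overlapping_squares (T : List (Int × Int × Int × Int)) (area : Int) (idx : Int) (squares : List (Int × Int × Int × Int)) : Prop :=
  ((-(T.length : Int) ≤ idx) ∧
    (squares.length ≤ 13 ∨
      ∀ sq ∈ T, ¬ ((sq.1 = sq.2.1 ∧ sq.2.2.2 < sq.2.2.1) ∨ (sq.2.2.1 = sq.2.2.2 ∧ sq.2.1 < sq.1))))
  ∨ pvSquareCollision squares = true ∨ 2012 < area ∨ squares.length = 13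
instance (T : List (Int × Int × Int × Int)) (area : Int) (idx : Int) (squares : List (Int × Int × Int × Int)) : Decidable (Pre_non_overlapping_squares T area idx squares) := by unfold Pre_non_overlapping_squares; infer_instance

def pvWitness_non_overlapping_squares : (List (Int × Int × Int × Int)) × Int × Int × (List (Int × Int × Int × Int)) :=
  ([(0, 3, 0, 4), (5, 9, 5, 9)], 0, 0, [])

def Spec_non_overlapping_squares (T : List (Int × Int × Int × Int)) (area : Int) (idx : Int) (squares : List (Int × Int × Int × Int)) (out : Bool) : Prop := out = non_overlapping_squares_alt T area idx squares
instance (T : List (Int × Int × Int × Int)) (area : Int) (idx : Int) (squares : List (Int × Int × Int × Int)) (out : Bool) : Decidable (Spec_non_overlapping_squares T area idx squares out) := by unfold Spec_non_overlapping_squares; infer_instance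

-- ===== CLAIM (what is proved, stated in full; the proofs are below) =====
def Claim_equal_non_overlapping_squares : Prop := ∀ (T : List (Int × Int × Int × Int)) (area : Int) (idx : Int) (squares : List (Int × Int × Int × Int)), Dom_non_overlapping_squares T area idx squares → Pre_non_overlapping_squares T area idx squares → Spec_non_overlapping_squares T area idx squares (non_overlapping_squares T area idx squares)

-- ===== LEMMAS AND PROOFS =====

-- the two collision tests agree
theorem pvCollide_bridge (l : List (Int × Int × Int × Int)) :
    pvCollideLast l = pvSquareCollision l := by
  rcases List.eq_nil_or_concat l with rfl | ⟨ys, last, rfl⟩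
  · rfl
  · rw [List.concat_eq_append]
    have hslice : PySem.List.slice (ys ++ [last]) none (some (-1)) = ys := by simp [pysem]
    have hlen : (ys ++ [last]).length - 1 = ys.length := by simp
    have hgd : ∀ i, i < ys.length →
        (ys ++ [last]).getD i (0, 0, 0, 0) = ys.getD i (0, 0, 0, 0) :=
      fun i hi => List.getD_append ys [last] (0, 0, 0, 0) i hi
    have hgl : (ys ++ [last]).getD ((ys ++ [last]).length - 1) (0, 0, 0, 0) = last := by
      rw [hlen, List.getD_eq_getElem _ _ (by simp)]
      simp
    unfold pvCollideLast pvSquareCollision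
    rw [show (ys ++ [last]).getLast? = some last from by simp, hslice, hgl, hlen]
    rw [Bool.eq_iff_iff]
    simp only [List.any_eq_true, List.mem_range, pvNoOverlap]
    constructor
    · rintro ⟨s, hs, hp⟩
      rcases List.mem_iff_getElem.1 hs with ⟨i, hi, rfl⟩
      refine ⟨i, hi, ?_⟩
      rw [hgd i hi, List.getD_eq_getElem _ _ hi]
      exact hp
    · rintro ⟨i, hi, hp⟩
      refine ⟨ys[i], List.getElem_mem hi, ?_⟩
      rw [hgd i hi, List.getD_eq_getElem _ _ hi] at hp
      exact hp

-- any over a filterMap of partial constructors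
theorem pvAny_filterMap {α β : Type} (l : List α) (g : α → Option β) (p : β → Bool) :
    (l.filterMap g).any p = l.any fun a => ((g a).map p).getD false := by
  induction l with
  | nil => rfl
  | cons x xs ih =>
    cases hx : g x <;> simp [hx, ih]

-- branch characterisations of A's recursion
theorem pvGoA_coll (T : List (Int × Int × Int × Int)) (fuel : Nat) (area idx : Int)
    (squares : List (Int × Int × Int × Int)) (h1 : pvSquareCollision squares = true) :
    pvGoA T fuel area idx squares = false := by
  rw [pvGoA.eq_def]; simp [h1]

theorem pvGoA_area (T : List (Int × Int × Int × Int)) (fuel : Nat) (area idx : Int)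
    (squares : List (Int × Int × Int × Int)) (h2 : decide ((2012 : Int) < area) = true) :
    pvGoA T fuel area idx squares = false := by
  rw [pvGoA.eq_def]; simp [h2]

theorem pvGoA_13 (T : List (Int × Int × Int × Int)) (fuel : Nat) (area idx : Int)
    (squares : List (Int × Int × Int × Int)) (h1 : pvSquareCollision squares = false)
    (h2 : decide ((2012 : Int) < area) = false) (h3 : squares.length = 13) :
    pvGoA T fuel area idx squares = decide (area = 2012) := by
  rw [pvGoA.eq_def]; simp [h1, h2, h3]

theorem pvGoA_zero (T : List (Int × Int × Int × Int)) (area idx : Int)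
    (squares : List (Int × Int × Int × Int)) (h1 : pvSquareCollision squares = false)
    (h2 : decide ((2012 : Int) < area) = false) (h3 : ¬squares.length = 13) :
    pvGoA T 0 area idx squares = false := by
  rw [pvGoA.eq_def]; simp [h1, h2, h3]

theorem pvGoA_succ (T : List (Int × Int × Int × Int)) (f : Nat) (area idx : Int)
    (squares : List (Int × Int × Int × Int)) (h1 : pvSquareCollision squares = false)
    (h2 : decide ((2012 : Int) < area) = false) (h3 : ¬squares.length = 13) :
    pvGoA T (f + 1) area idx squares
      = (PySem.List.pyRange idx (T.length : Int) 1).any (fun i =>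
          match pvNewArguments T i with
          | none => false
          | some arg => pvGoA T f (area + pvSummarySquare arg) i (squares ++ [arg])) := by
  rw [pvGoA.eq_def]; simp [h1, h2, h3]

-- children pushed by one pop, evaluated pointwise, are exactly A's loop body
theorem pvStep_any (T : List (Int × Int × Int × Int)) (f : Nat) (area idx : Int)
    (squares : List (Int × Int × Int × Int)) :
    (pvStep T f area idx squares).any (fun s => pvGoA T s.1 s.2.1 s.2.2.1 s.2.2.2)
      = (PySem.List.pyRange idx (T.length : Int) 1).any (fun i =>
          match pvNewArguments T i with
          | none => false
          | some arg => pvGoA T f (area + pvSummarySquare arg) i (squares ++ [arg])) := by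
  unfold pvStep
  rw [pvAny_filterMap]
  congr 1
  funext i
  cases hx : PySem.List.pyGet? T i <;> simp [pvNewArguments, hx, pvSummarySquare]

-- the worklist loop returns true iff some stacked state evaluates to true under A's recursion
theorem pvGoB_any (T : List (Int × Int × Int × Int))
    (stack : List (Nat × Int × Int × List (Int × Int × Int × Int))) :
    pvGoB T stack = stack.any fun s => pvGoA T s.1 s.2.1 s.2.2.1 s.2.2.2 := by
  fun_induction pvGoB T stack with
  | case1 => rfl
  | case2 fuel area idx squares rest h ih =>
    rw [pvCollide_bridge] at h
    rw [List.any_cons, ih, pvGoA_coll T fuel area idx squares h]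
    simp
  | case3 fuel area idx squares rest h1 h2 ih =>
    rw [List.any_cons, ih, pvGoA_area T fuel area idx squares h2]
    simp
  | case4 fuel idx squares rest hcoll hlen harea =>
    rw [pvCollide_bridge] at hcoll
    simp only [Bool.not_eq_true] at hcoll harea
    rw [List.any_cons, pvGoA_13 T fuel 2012 idx squares hcoll harea hlen]
    simp
  | case5 fuel area idx squares rest h1 h2 h3 h4 ih =>
    rw [pvCollide_bridge] at h1
    simp only [Bool.not_eq_true] at h1 h2
    rw [List.any_cons, ih, pvGoA_13 T fuel area idx squares h1 h2 h3]
    simp [h4]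
  | case6 area idx squares rest h1 h2 h3 ih =>
    rw [pvCollide_bridge] at h1
    simp only [Bool.not_eq_true] at h1 h2
    rw [List.any_cons, ih, pvGoA_zero T area idx squares h1 h2 h3]
    simp
  | case7 area idx squares rest h1 h2 h3 f ih =>
    rw [pvCollide_bridge] at h1
    simp only [Bool.not_eq_true] at h1 h2
    rw [ih, List.any_append, List.any_cons, pvStep_any,
      pvGoA_succ T f area idx squares h1 h2 h3]

-- ===== VERDICT (by name: the statement is the Claim_ definition above) =====
theorem non_overlapping_squares_spec : Claim_equal_non_overlapping_squares := by
  intro T area idx squares _ _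
  unfold Spec_non_overlapping_squares non_overlapping_squares non_overlapping_squares_alt
  rw [pvGoB_any]
  simp
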